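-- pv_equiv track=rewrite | github.com/Aasthaengg/IBMdataset | Python_codes/p03200/s303330622.py | integration
-- ===== SOURCE A (Python) =====
-- def integration(s):
--   itg = [0]
--   counter = 0
--   for x in s:
--     if x == "B":
--       counter += 1
--     itg.append(counter)
--   return itg
-- ===== SOURCE B (Python) =====
-- def integration(s):
--   return [s[:i].count("B") for i in range(len(s) + 1)]
-- ===== Notes on version B (the rewrite author's own statement) =====
-- stated objective: alternative
-- what changed: B drops A's single accumulating pass and instead re-counts each prefix independently with a slice-and-count comprehension (repeated scanning, O(n^2), vs one-pass accumulation).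
import Mathlib
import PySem

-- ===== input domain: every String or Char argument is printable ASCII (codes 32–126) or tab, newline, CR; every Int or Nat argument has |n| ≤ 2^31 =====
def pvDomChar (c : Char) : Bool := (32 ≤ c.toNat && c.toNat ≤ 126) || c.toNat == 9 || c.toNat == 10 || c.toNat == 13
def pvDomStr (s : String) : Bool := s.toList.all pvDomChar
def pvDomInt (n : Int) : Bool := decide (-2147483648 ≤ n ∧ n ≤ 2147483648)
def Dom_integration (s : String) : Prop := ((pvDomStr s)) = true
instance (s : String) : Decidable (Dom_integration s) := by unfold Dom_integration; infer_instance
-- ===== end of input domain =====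

-- B replaces A's single accumulating pass with a comprehension that re-counts each prefix slice independently (return-value equivalence; no mutation visible to callers).


-- ===== PORT A =====
-- A: itg = [0]; counter = 0; for x in s: if x == 'B': counter += 1; itg.append(counter)
def integration (s : String) : List Int :=
  (s.toList.foldl
    (fun (st : List Int × Int) x =>
      let counter := if x == 'B' then st.2 + 1 else st.2
      (st.1 ++ [counter], counter))
    ([0], 0)).1

-- ===== PORT B =====
-- B: [s[:i].count("B") for i in range(len(s) + 1)]
-- s[:i] with 0 ≤ i is exactly 'take i' of the character list, and str.count of a
-- single character on that slice is List.count; range(len(s)+1) is List.range (len+1).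
def integration_alt (s : String) : List Int :=
  (List.range (s.toList.length + 1)).map
    (fun i => ((s.toList.take i).count 'B' : Int))

-- ===== PRECONDITION & SPEC =====
def Spec_integration (s : String) (out : List Int) : Prop := out = integration_alt s
instance (s : String) (out : List Int) : Decidable (Spec_integration s out) := by unfold Spec_integration; infer_instance

-- ===== CLAIM (what is proved, stated in full; the proofs are below) =====
def Claim_equal_integration : Prop := ∀ (s : String), Dom_integration s → Spec_integration s (integration s)

-- ===== LEMMAS AND PROOFS =====

-- Invariant of A's loop: from any accumulator and running counter.
theorem integration_foldl_add (l : List Char) (acc : List Int) (c : Int) :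
    (l.foldl
      (fun (st : List Int × Int) x =>
        let counter := if x == 'B' then st.2 + 1 else st.2
        (st.1 ++ [counter], counter))
      (acc, c)).1
    = acc ++ (List.range l.length).map (fun i => c + ((l.take (i + 1)).count 'B' : Int)) := by
  induction l generalizing acc c with
  | nil => simp
  | cons x t ih =>
    simp only [List.foldl_cons, List.length_cons, List.range_succ_eq_map]
    rw [ih]
    by_cases hx : x = 'B' <;>
      simp [hx, List.map_map, Function.comp, List.append_assoc, add_assoc, add_comm]

-- A's value in closed form: the prefix counts.
theorem integration_closed (s : String) :
    integration s = (List.range (s.toList.length + 1)).map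
      (fun i => ((s.toList.take i).count 'B' : Int)) := by
  unfold integration
  rw [integration_foldl_add, List.range_succ_eq_map, List.map_cons, List.map_map]
  simp

-- ===== VERDICT (by name: the statement is the Claim_ definition above) =====
theorem integration_spec : Claim_equal_integration := by
  intro s _
  unfold Spec_integration integration_alt
  exact integration_closed s
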